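-- pv_equiv track=rewrite | github.com/ChrisChen667788/antifomo | backend/app/services/watchlist_automation_service.py | _request_failure_stats
-- ===== SOURCE A (Python) =====
-- def _request_failure_stats(log_lines: list[str]) -> tuple[int, int]:
--     recent = 0
--     consecutive = 0
--     for line in log_lines:
--         if "request failed:" in line.lower():
--             recent += 1
--     for line in reversed(log_lines):
--         if "request failed:" not in line.lower():
--             break
--         consecutive += 1
--     return recent, consecutive
-- ===== SOURCE B (Python) =====
-- def _request_failure_stats(log_lines: list[str]) -> tuple[int, int]:
--     recent = 0
--     consecutive = 0
--     for line in log_lines: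
--         if "request failed:" in line.lower():
--             recent += 1
--             consecutive += 1
--         else:
--             consecutive = 0
--     return recent, consecutive
-- ===== Notes on version B (the rewrite author's own statement) =====
-- stated objective: simpler
-- what changed: Replaces A's two passes (a forward counting loop plus a reverse scan with break for the trailing run) by a single forward loop maintaining a reset-on-non-match run counter.
import Mathlib
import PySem

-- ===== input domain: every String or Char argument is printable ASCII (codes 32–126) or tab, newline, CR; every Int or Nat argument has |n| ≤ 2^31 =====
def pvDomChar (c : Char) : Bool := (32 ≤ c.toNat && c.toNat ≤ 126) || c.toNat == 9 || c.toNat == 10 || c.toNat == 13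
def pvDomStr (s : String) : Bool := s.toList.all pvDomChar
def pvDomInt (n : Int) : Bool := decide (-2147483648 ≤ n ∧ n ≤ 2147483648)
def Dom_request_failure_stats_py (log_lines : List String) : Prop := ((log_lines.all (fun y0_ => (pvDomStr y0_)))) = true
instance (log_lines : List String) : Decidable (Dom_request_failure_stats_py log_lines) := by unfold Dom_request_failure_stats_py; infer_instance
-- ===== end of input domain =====

-- B replaces A's two passes (forward count + reverse scan with break) by one forward
-- loop with a reset-on-non-match run counter; objective: simpler.

-- "request failed:" in line.lower()
def pvIsFail (line : String) : Bool :=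
  PySem.Str.isIn "request failed:" (PySem.Str.lower line)

-- ===== PORT A =====
-- second loop of A: scan reversed list, break at first non-match, counting matches
def pvTrail : List String → Int
  | [] => 0
  | l :: rest => if !(pvIsFail l) then 0 else pvTrail rest + 1

def request_failure_stats_py (log_lines : List String) : Int × Int :=
  let recent : Int := log_lines.foldl (fun acc line => if pvIsFail line then acc + 1 else acc) 0
  let consecutive : Int := pvTrail log_lines.reverse
  (recent, consecutive)

-- ===== PORT B =====
def request_failure_stats_py_alt (log_lines : List String) : Int × Int :=
  log_lines.foldl
    (fun (p : Int × Int) line => if pvIsFail line then (p.1 + 1, p.2 + 1) else (p.1, 0))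
    (0, 0)

-- ===== PRECONDITION & SPEC =====
def Spec_request_failure_stats_py (log_lines : List String) (out : Int × Int) : Prop := out = request_failure_stats_py_alt log_lines
instance (log_lines : List String) (out : Int × Int) : Decidable (Spec_request_failure_stats_py log_lines out) := by unfold Spec_request_failure_stats_py; infer_instance

-- ===== CLAIM (what is proved, stated in full; the proofs are below) =====
def Claim_equal_request_failure_stats_py : Prop := ∀ (log_lines : List String), Dom_request_failure_stats_py log_lines → Spec_request_failure_stats_py log_lines (request_failure_stats_py log_lines)

-- ===== LEMMAS AND PROOFS =====

theorem pv_alt_eq (log_lines : List String) :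
    request_failure_stats_py_alt log_lines = request_failure_stats_py log_lines := by
  unfold request_failure_stats_py_alt request_failure_stats_py
  induction log_lines using List.reverseRecOn with
  | nil => simp [pvTrail]
  | append_singleton xs x ih =>
    simp only [List.foldl_append, List.foldl_cons, List.foldl_nil, List.reverse_append,
      List.reverse_singleton, List.singleton_append, ih]
    by_cases h : pvIsFail x = true <;> simp [pvTrail, h]

-- ===== VERDICT (by name: the statement is the Claim_ definition above) =====
theorem request_failure_stats_py_spec : Claim_equal_request_failure_stats_py := by
  intro xs _
  unfold Spec_request_failure_stats_py
  exact (pv_alt_eq xs).symm
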